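-- pv_equiv track=rewrite | github.com/xinghun61/infra | appengine/findit/waterfall/flake/recursive_flake_pipeline.py | _GetListOfNearbyBuildNumbers
-- ===== SOURCE A (Python) =====
-- def _GetListOfNearbyBuildNumbers(
--     preferred_run_build_number, lower_bound_build_number,
--     upper_bound_build_number, maximum_threshold):
--   """Gets a list of numbers within range near preferred_run_build_number.
--
--   Args:
--     preferred_run_build_number (int): Assumed to be a positive number.
--     lower_bound_build_number (int): The smallest build number allowed, or None.
--     upper_bound_build_number (int): The largest build number allowed, or None.
--     maximum_threshold (int): A non-negative number for how far in either
--     direction to look.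
--
--   Returns:
--     A list of nearby numbers within maximum_threshold before and after
--     preferred_run_build_number, ordered by closest to farthest. For example, if
--     preferred_run_build_number is 1000 and maximum_threshold is 2, return
--     [1000, 999, 1001, 998, 1002].
--   """
--   lower_bound = lower_bound_build_number or 0
--   upper_bound = (
--       upper_bound_build_number if upper_bound_build_number is not None else
--       preferred_run_build_number + maximum_threshold)
--   nearby_build_numbers = [preferred_run_build_number]
--
--   for i in range(1, maximum_threshold + 1):
--     if preferred_run_build_number - i >= lower_bound:
--       nearby_build_numbers.append(preferred_run_build_number - i)
--
--     if preferred_run_build_number + i <= upper_bound: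
--       nearby_build_numbers.append(preferred_run_build_number + i)
--
--   return nearby_build_numbers
-- ===== SOURCE B (Python) =====
-- def _GetListOfNearbyBuildNumbers(
--     preferred_run_build_number, lower_bound_build_number,
--     upper_bound_build_number, maximum_threshold):
--   p = preferred_run_build_number
--   lower = lower_bound_build_number or 0
--   upper = (
--       upper_bound_build_number if upper_bound_build_number is not None else
--       p + maximum_threshold)
--   lows = range(max(lower, p - maximum_threshold), p)
--   highs = range(p + 1, min(upper, p + maximum_threshold) + 1)
--   candidates = list(lows) + [p] + list(highs)
--   return sorted(candidates, key=lambda n: 2 * abs(n - p) + (n > p))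
-- ===== Notes on version B (the rewrite author's own statement) =====
-- stated objective: alternative
-- what changed: B enumerates the eligible window as two explicit ranges plus the preferred number and sorts the candidates by the key (2*distance + above-flag), instead of A's loop that interleaves p-i/p+i for growing i.
import Mathlib
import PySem

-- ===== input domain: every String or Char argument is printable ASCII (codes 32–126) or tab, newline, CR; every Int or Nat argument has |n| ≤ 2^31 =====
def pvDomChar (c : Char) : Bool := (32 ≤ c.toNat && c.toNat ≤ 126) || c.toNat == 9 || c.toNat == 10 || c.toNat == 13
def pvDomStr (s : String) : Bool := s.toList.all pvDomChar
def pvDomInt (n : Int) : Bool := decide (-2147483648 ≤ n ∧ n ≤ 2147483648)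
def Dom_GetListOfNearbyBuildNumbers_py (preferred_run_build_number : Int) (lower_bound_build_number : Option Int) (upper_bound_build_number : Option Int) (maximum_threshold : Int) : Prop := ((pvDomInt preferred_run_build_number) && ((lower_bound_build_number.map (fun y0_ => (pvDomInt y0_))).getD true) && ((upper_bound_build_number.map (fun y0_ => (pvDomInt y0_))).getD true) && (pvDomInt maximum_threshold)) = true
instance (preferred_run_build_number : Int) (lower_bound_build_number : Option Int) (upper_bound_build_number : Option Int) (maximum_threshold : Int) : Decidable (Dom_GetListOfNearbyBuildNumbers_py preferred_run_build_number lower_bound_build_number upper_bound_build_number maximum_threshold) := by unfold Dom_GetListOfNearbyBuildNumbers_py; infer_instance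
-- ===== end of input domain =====

-- B enumerates the in-bounds window as two ranges plus the preferred number and sorts by
-- (distance, below-before-above) instead of A's incremental interleaving loop; alternative, same cost.

-- ===== PORT A =====
def GetListOfNearbyBuildNumbers_py (preferred_run_build_number : Int) (lower_bound_build_number : Option Int) (upper_bound_build_number : Option Int) (maximum_threshold : Int) : List Int :=
  -- `lower_bound_build_number or 0`: 0 when None; a falsy 0 also yields 0
  let lower : Int := match lower_bound_build_number with
    | none => 0
    | some l => if l = 0 then 0 else l
  let upper : Int := match upper_bound_build_number with
    | some u => u
    | none => preferred_run_build_number + maximum_threshold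
  (PySem.List.pyRange 1 (maximum_threshold + 1)).foldl
    (fun acc i =>
      let acc := if preferred_run_build_number - i ≥ lower then acc ++ [preferred_run_build_number - i] else acc
      if preferred_run_build_number + i ≤ upper then acc ++ [preferred_run_build_number + i] else acc)
    [preferred_run_build_number]

-- ===== PORT B =====
def GetListOfNearbyBuildNumbers_py_alt (preferred_run_build_number : Int) (lower_bound_build_number : Option Int) (upper_bound_build_number : Option Int) (maximum_threshold : Int) : List Int :=
  -- `lower_bound_build_number or 0`: 0 when None; a falsy 0 also yields 0
  let lower : Int := match lower_bound_build_number with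
    | none => 0
    | some l => if l = 0 then 0 else l
  let upper : Int := match upper_bound_build_number with
    | some u => u
    | none => preferred_run_build_number + maximum_threshold
  let lows := PySem.List.pyRange (max lower (preferred_run_build_number - maximum_threshold)) preferred_run_build_number
  let highs := PySem.List.pyRange (preferred_run_build_number + 1) (min upper (preferred_run_build_number + maximum_threshold) + 1)
  PySem.List.sorted (lows ++ [preferred_run_build_number] ++ highs)
    (fun n => 2 * |n - preferred_run_build_number| + (if preferred_run_build_number < n then 1 else 0))

-- ===== PRECONDITION & SPEC =====
def Spec_GetListOfNearbyBuildNumbers_py (preferred_run_build_number : Int) (lower_bound_build_number : Option Int) (upper_bound_build_number : Option Int) (maximum_threshold : Int) (out : List Int) : Prop := out = GetListOfNearbyBuildNumbers_py_alt preferred_run_build_number lower_bound_build_number upper_bound_build_number maximum_threshold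
instance (preferred_run_build_number : Int) (lower_bound_build_number : Option Int) (upper_bound_build_number : Option Int) (maximum_threshold : Int) (out : List Int) : Decidable (Spec_GetListOfNearbyBuildNumbers_py preferred_run_build_number lower_bound_build_number upper_bound_build_number maximum_threshold out) := by unfold Spec_GetListOfNearbyBuildNumbers_py; infer_instance

-- ===== CLAIM (what is proved, stated in full; the proofs are below) =====
def Claim_equal_GetListOfNearbyBuildNumbers_py : Prop := ∀ (preferred_run_build_number : Int) (lower_bound_build_number : Option Int) (upper_bound_build_number : Option Int) (maximum_threshold : Int), Dom_GetListOfNearbyBuildNumbers_py preferred_run_build_number lower_bound_build_number upper_bound_build_number maximum_threshold → Spec_GetListOfNearbyBuildNumbers_py preferred_run_build_number lower_bound_build_number upper_bound_build_number maximum_threshold (GetListOfNearbyBuildNumbers_py preferred_run_build_number lower_bound_build_number upper_bound_build_number maximum_threshold)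

-- ===== LEMMAS AND PROOFS =====

-- what A appends at distance i
def pvG (p lower upper i : Int) : List Int :=
  (if lower ≤ p - i then [p - i] else []) ++ (if p + i ≤ upper then [p + i] else [])

-- B's sort key
def pvKey (p n : Int) : Int := 2 * |n - p| + (if p < n then 1 else 0)

-- A's result after distances 1..t
def pvA (p lower upper : Int) (t : Nat) : List Int :=
  [p] ++ (PySem.List.pyRange 1 ((t : Int) + 1)).flatMap (pvG p lower upper)

-- B's candidate window for threshold t
def pvC (p lower upper : Int) (t : Nat) : List Int :=
  PySem.List.pyRange (max lower (p - (t : Int))) p ++ [p] ++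
    PySem.List.pyRange (p + 1) (min upper (p + (t : Int)) + 1)

lemma pvPerm_aux (x : Int) (L r : List Int) : (L ++ ([x] ++ r)).Perm (x :: (L ++ r)) :=
  List.perm_middle

lemma pvRange_nil {a b : Int} (h : b ≤ a) : PySem.List.pyRange a b = [] := by
  simp [PySem.List.pyRange, show ¬ a < b by omega]

lemma pvA_zero (p lower upper : Int) : pvA p lower upper 0 = [p] := by
  unfold pvA
  rw [show ((0 : Nat) : Int) + 1 = 1 by norm_num, pvRange_nil le_rfl]
  simp

lemma pvA_succ (p lower upper : Int) (t : Nat) :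
    pvA p lower upper (t + 1) = pvA p lower upper t ++ pvG p lower upper ((t : Int) + 1) := by
  unfold pvA
  rw [show ((t + 1 : Nat) : Int) + 1 = ((t : Int) + 1) + 1 by push_cast; ring,
    PySem.List.pyRange_one_succ_right (by omega : (1 : Int) ≤ (t : Int) + 1)]
  simp

lemma pvA_bound (p lower upper : Int) (t : Nat) :
    ∀ x ∈ pvA p lower upper t, p - (t : Int) ≤ x ∧ x ≤ p + (t : Int) := by
  induction t with
  | zero => intro x hx; rw [pvA_zero] at hx; simp at hx; omega
  | succ n ih =>
    intro x hx
    rw [pvA_succ] at hx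
    rcases List.mem_append.1 hx with h | h
    · have := ih x h; push_cast; omega
    · unfold pvG at h
      rcases List.mem_append.1 h with h' | h' <;> (split_ifs at h' <;> simp at h' <;> push_cast <;> omega)

lemma pvKey_below (p i : Int) (hi : 1 ≤ i) : pvKey p (p - i) = 2 * i := by
  unfold pvKey
  rw [show p - i - p = -i by ring, abs_neg, abs_of_pos (by omega), if_neg (by omega)]
  ring

lemma pvKey_above (p i : Int) (hi : 1 ≤ i) : pvKey p (p + i) = 2 * i + 1 := by
  unfold pvKey
  rw [show p + i - p = i by ring, abs_of_pos (by omega), if_pos (by omega)]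

lemma pvKey_le (p x t : Int) (h : p - t ≤ x ∧ x ≤ p + t) : pvKey p x ≤ 2 * t + 1 := by
  unfold pvKey
  have habs : |x - p| ≤ t := abs_le.2 ⟨by omega, by omega⟩
  split_ifs <;> omega

lemma pvA_pairwise (p lower upper : Int) (t : Nat) :
    (pvA p lower upper t).Pairwise (fun a b => pvKey p a < pvKey p b) := by
  induction t with
  | zero => rw [pvA_zero]; simp
  | succ n ih =>
    rw [pvA_succ]
    refine List.pairwise_append.2 ⟨ih, ?_, ?_⟩
    · unfold pvG
      split_ifs <;> simp
      rw [pvKey_below p _ (by omega), pvKey_above p _ (by omega)]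
      omega
    · intro a ha b hb
      have hA := pvA_bound p lower upper n a ha
      have hka : pvKey p a ≤ 2 * (n : Int) + 1 := pvKey_le p a _ hA
      unfold pvG at hb
      rcases List.mem_append.1 hb with h' | h' <;> split_ifs at h' <;> simp at h' <;> subst h'
      · rw [pvKey_below p _ (by omega)]; omega
      · rw [pvKey_above p _ (by omega)]; omega

lemma pvA_perm (p lower upper : Int) (t : Nat) :
    (pvA p lower upper t).Perm (pvC p lower upper t) := by
  induction t with
  | zero =>
    rw [pvA_zero]; unfold pvC
    rw [pvRange_nil (by have := le_max_right lower (p - ((0 : Nat) : Int)); push_cast at this ⊢; omega),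
      pvRange_nil (by have := min_le_right upper (p + ((0 : Nat) : Int)); push_cast at this ⊢; omega)]
    simp
  | succ n ih =>
    rw [pvA_succ]; unfold pvC at ih ⊢
    have hc : ((n + 1 : Nat) : Int) = (n : Int) + 1 := by push_cast; ring
    rw [hc]
    by_cases hlo : lower ≤ p - ((n : Int) + 1)
    · have h1 : max lower (p - ((n : Int) + 1)) = p - ((n : Int) + 1) := max_eq_right (by omega)
      have h2 : max lower (p - (n : Int)) = p - (n : Int) := max_eq_right (by omega)
      rw [h1, PySem.List.pyRange_one_cons (by omega : p - ((n : Int) + 1) < p),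
        show p - ((n : Int) + 1) + 1 = p - (n : Int) by ring]
      rw [h2] at ih
      by_cases hup : p + ((n : Int) + 1) ≤ upper
      · have h3 : min upper (p + ((n : Int) + 1)) = p + ((n : Int) + 1) := min_eq_right (by omega)
        have h4 : min upper (p + (n : Int)) = p + (n : Int) := min_eq_right (by omega)
        rw [h3, show p + ((n : Int) + 1) + 1 = (p + (n : Int) + 1) + 1 by ring,
          PySem.List.pyRange_one_succ_right (by omega : p + 1 ≤ p + (n : Int) + 1)]
        rw [h4] at ih
        unfold pvG
        rw [if_pos hlo, if_pos hup]
        refine ((ih.append_right _).trans ?_)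
        refine (pvPerm_aux _ _ _).trans (List.Perm.of_eq ?_)
        simp
        omega
      · have h3 : min upper (p + ((n : Int) + 1)) = upper := min_eq_left (by omega)
        have h4 : min upper (p + (n : Int)) = upper := min_eq_left (by omega)
        rw [h3]; rw [h4] at ih
        unfold pvG
        rw [if_pos hlo, if_neg hup]
        refine ((ih.append_right _).trans ?_)
        refine (pvPerm_aux _ _ _).trans (List.Perm.of_eq ?_)
        simp
    · have h1 : max lower (p - ((n : Int) + 1)) = lower := max_eq_left (by omega)
      have h2 : max lower (p - (n : Int)) = lower := max_eq_left (by omega)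
      rw [h1]; rw [h2] at ih
      by_cases hup : p + ((n : Int) + 1) ≤ upper
      · have h3 : min upper (p + ((n : Int) + 1)) = p + ((n : Int) + 1) := min_eq_right (by omega)
        have h4 : min upper (p + (n : Int)) = p + (n : Int) := min_eq_right (by omega)
        rw [h3, show p + ((n : Int) + 1) + 1 = (p + (n : Int) + 1) + 1 by ring,
          PySem.List.pyRange_one_succ_right (by omega : p + 1 ≤ p + (n : Int) + 1)]
        rw [h4] at ih
        unfold pvG
        rw [if_neg hlo, if_pos hup]
        refine ((ih.append_right _).trans (List.Perm.of_eq ?_))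
        simp
        omega
      · have h3 : min upper (p + ((n : Int) + 1)) = upper := min_eq_left (by omega)
        have h4 : min upper (p + (n : Int)) = upper := min_eq_left (by omega)
        rw [h3]; rw [h4] at ih
        unfold pvG
        rw [if_neg hlo, if_neg hup]
        simpa using ih

lemma pvB_core (p lower upper thr : Int) :
    PySem.List.sorted
        (PySem.List.pyRange (max lower (p - thr)) p ++ [p] ++
          PySem.List.pyRange (p + 1) (min upper (p + thr) + 1))
        (fun n => 2 * |n - p| + (if p < n then 1 else 0))
      = pvA p lower upper thr.toNat := by
  have hkey : (fun n : Int => 2 * |n - p| + (if p < n then 1 else 0)) = pvKey p := rfl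
  rw [hkey]
  by_cases h : 0 ≤ thr
  · have hth : ((thr.toNat : Nat) : Int) = thr := Int.toNat_of_nonneg h
    have := PySem.List.sorted_eq_of_perm_of_pairwise_lt (pvC p lower upper thr.toNat)
      (pvA p lower upper thr.toNat) (pvKey p)
      (pvA_perm p lower upper thr.toNat) (pvA_pairwise p lower upper thr.toNat)
    unfold pvC at this
    rw [hth] at this
    exact this
  · have h0 : thr.toNat = 0 := Int.toNat_of_nonpos (by omega)
    rw [h0, pvA_zero,
      pvRange_nil (by have := le_max_right lower (p - thr); omega),
      pvRange_nil (by have := min_le_right upper (p + thr); omega)]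
    have := PySem.List.sorted_eq_of_perm_of_pairwise_lt ([p]) ([p]) (pvKey p)
      (List.Perm.refl _) (List.pairwise_singleton _ _)
    simpa using this

lemma pvA_core (p lower upper thr : Int) :
    (PySem.List.pyRange 1 (thr + 1)).foldl
        (fun acc i =>
          let acc := if p - i ≥ lower then acc ++ [p - i] else acc
          if p + i ≤ upper then acc ++ [p + i] else acc)
        [p]
      = pvA p lower upper thr.toNat := by
  rw [PySem.List.foldl_congr_mem _ _ (fun acc i => acc ++ pvG p lower upper i) _
    (by intro acc i _; simp only [pvG, ge_iff_le]; split_ifs <;> simp)]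
  rw [PySem.List.foldl_append_eq_flatMap]
  unfold pvA
  by_cases h : 0 ≤ thr
  · rw [show ((thr.toNat : Nat) : Int) + 1 = thr + 1 by rw [Int.toNat_of_nonneg h]]
  · rw [show thr.toNat = 0 from Int.toNat_of_nonpos (by omega),
      pvRange_nil (by omega : thr + 1 ≤ 1),
      show ((0 : Nat) : Int) + 1 = 1 by norm_num, pvRange_nil le_rfl]

-- ===== VERDICT (by name: the statement is the Claim_ definition above) =====
theorem GetListOfNearbyBuildNumbers_py_spec : Claim_equal_GetListOfNearbyBuildNumbers_py := by
  intro p lo up thr _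
  unfold Spec_GetListOfNearbyBuildNumbers_py
  cases lo <;> cases up <;>
    (simp only [GetListOfNearbyBuildNumbers_py, GetListOfNearbyBuildNumbers_py_alt];
     rw [pvA_core, pvB_core])
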